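-- pv_equiv track=rewrite | github.com/krzysztofkub/AdventOfCode | Day9/second.py | calc_val
-- ===== SOURCE A (Python) =====
-- def calc_val(numbers):
--     first_numbers = [numbers[0]]
--     while True:
--         numbers = [numbers[i] - numbers[i + 1] for i in range(len(numbers) - 1)]
--         first_numbers.append(numbers[0])
--
--         if len(set(numbers)) == 1:
--             break
--
--     return sum(first_numbers)
-- ===== SOURCE B (Python) =====
-- def next_coeffs(c):
--     # signed Pascal step: from [(-1)^j * C(k,j)]_j to [(-1)^j * C(k+1,j)]_j
--     return [1] + [b - a for a, b in zip(c, c[1:])] + [-c[-1]]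
--
--
-- def calc_val(numbers):
--     n = len(numbers)
--     coeffs = [1]  # signed binomial coefficients (-1)^j * C(k, j) of the current order k
--     k = 0
--     while True:
--         coeffs = next_coeffs(coeffs)
--         k += 1
--         # the k-th difference row, read off directly from the input by convolution
--         row = [sum(c * v for c, v in zip(coeffs, numbers[m:])) for m in range(n - k)]
--         if len(set(row)) == 1:
--             break
--     # sum of the heads of rows 0..k collapses (hockey stick) to one weighted sum
--     nxt = next_coeffs(coeffs)
--     return -sum(c * v for c, v in zip(nxt[1:], numbers))
-- ===== Notes on version B (the rewrite author's own statement) =====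
-- stated objective: alternative
-- what changed: A repeatedly differences the data row and sums the heads of all rows; B never differences the data: it maintains the signed binomial coefficient row (-1)^j*C(k,j) by a Pascal step, reads each k-th difference row directly off the original input as a convolution with those coefficients, and on the first constant row returns a single hockey-stick-collapsed weighted sum -sum(nxt[j+1]*numbers[j]) instead of summing row heads.
-- outside the precondition, e.g. on calc_val([0]): A raises IndexError, B does not finish within the time limit; on calc_val([]): A raises IndexError, B does not finish within the time limit
import Mathlib
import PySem

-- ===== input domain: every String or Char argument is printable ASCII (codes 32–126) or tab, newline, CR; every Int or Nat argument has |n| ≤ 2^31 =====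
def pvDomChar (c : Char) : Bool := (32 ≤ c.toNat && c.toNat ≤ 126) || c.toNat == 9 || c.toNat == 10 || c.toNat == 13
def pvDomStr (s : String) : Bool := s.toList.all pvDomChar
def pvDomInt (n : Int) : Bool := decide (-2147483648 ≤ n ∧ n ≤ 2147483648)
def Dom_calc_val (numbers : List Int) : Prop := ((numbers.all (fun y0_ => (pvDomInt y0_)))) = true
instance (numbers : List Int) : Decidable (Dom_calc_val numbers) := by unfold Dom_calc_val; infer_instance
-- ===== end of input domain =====

-- B replaces A's iterated differencing of the data by a maintained signed-Pascal coefficient row: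
-- each k-th difference row is a convolution of the ORIGINAL input with (-1)^j*C(k,j), and the
-- answer is one binomial-weighted sum over the input (alternative algorithm, same order of cost).


-- ===== PORT A =====
-- [numbers[i] - numbers[i + 1] for i in range(len(numbers) - 1)]
def pvDiffA (xs : List Int) : List Int :=
  (List.range (xs.length - 1)).map (fun i => xs.getD i 0 - xs.getD (i + 1) 0)

-- the 'while True' loop; fuel = initial length is a totality guard only (each row is one
-- shorter and a one-element row always passes the set test)
def pvLoopA (fuel : Nat) (numbers : List Int) (first_numbers : List Int) : Int :=
  match fuel with
  | 0 => first_numbers.sum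
  | fuel + 1 =>
    let numbers' := pvDiffA numbers
    let first' := first_numbers ++ [numbers'.headD 0]
    if (PySem.Set.ofList numbers').length = 1 then first'.sum
    else pvLoopA fuel numbers' first'

def calc_val (numbers : List Int) : Int :=
  pvLoopA numbers.length numbers [numbers.headD 0]

-- ===== PORT B =====
-- [1] + [b - a for a, b in zip(c, c[1:])] + [-c[-1]]  (c is never empty at a call site)
def pvNextCoeffs (c : List Int) : List Int :=
  [1] ++ List.zipWith (fun a b => b - a) c (PySem.List.slice c (some 1) none)
      ++ [-((PySem.List.pyGet? c (-1)).getD 0)]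

-- the 'while True' loop over (coeffs, k); fuel = len(numbers) is a totality guard only
def pvLoopB (fuel : Nat) (numbers : List Int) (coeffs : List Int) (k : Nat) : Int :=
  match fuel with
  | 0 => 0
  | f + 1 =>
    let coeffs' := pvNextCoeffs coeffs
    let k' := k + 1
    let row := (List.range (numbers.length - k')).map
      (fun (m : Nat) => (List.zipWith (fun c v => c * v) coeffs' (PySem.List.slice numbers (some (m : Int)) none)).sum)
    if (PySem.Set.ofList row).length = 1 then
      let nxt := pvNextCoeffs coeffs';
      -(List.zipWith (fun c v => c * v) (PySem.List.slice nxt (some 1) none) numbers).sum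
    else pvLoopB f numbers coeffs' k'

def calc_val_alt (numbers : List Int) : Int :=
  pvLoopB numbers.length numbers [1] 0

-- ===== PRECONDITION & SPEC =====
-- A indexes numbers[0] of the (possibly empty) difference row: it raises IndexError
-- on inputs of length < 2, so exactly those are excluded.
def Pre_calc_val (numbers : List Int) : Prop := 2 ≤ numbers.length
instance (numbers : List Int) : Decidable (Pre_calc_val numbers) := by unfold Pre_calc_val; infer_instance
def pvWitness_calc_val : List Int := [3, 1, 2]
def Spec_calc_val (numbers : List Int) (out : Int) : Prop := out = calc_val_alt numbers
instance (numbers : List Int) (out : Int) : Decidable (Spec_calc_val numbers out) := by unfold Spec_calc_val; infer_instance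

-- ===== CLAIM (what is proved, stated in full; the proofs are below) =====
def Claim_equal_calc_val : Prop := ∀ (numbers : List Int), Dom_calc_val numbers → Pre_calc_val numbers → Spec_calc_val numbers (calc_val numbers)

-- ===== LEMMAS AND PROOFS =====

-- proof-side helpers
-- entry m of the k-th difference row, as a binomial sum over the original input
def pvG (xs : List Int) (k m : Nat) : Int :=
  ∑ j ∈ Finset.range (k + 1), (-1 : Int) ^ j * (Nat.choose k j : Int) * xs.getD (m + j) 0

-- the signed Pascal row (-1)^j * C(k,j), j = 0..k
def pvPas (k : Nat) : List Int :=
  (List.range (k + 1)).map (fun j => (-1 : Int) ^ j * (Nat.choose k j : Int))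

theorem pvPas_tail (s : Nat) :
    (pvPas (s + 1)).tail
      = (List.range (s + 1)).map (fun j => (-1 : Int) ^ (j + 1) * (Nat.choose (s + 1) (j + 1) : Int)) := by
  simp [pvPas, List.range_succ_eq_map, Function.comp_def]

theorem pvPas_getLast? (k : Nat) : (pvPas k).getLast? = some ((-1 : Int) ^ k) := by
  have h : pvPas k
      = (List.range k).map (fun j => (-1 : Int) ^ j * (Nat.choose k j : Int))
        ++ [(-1 : Int) ^ k * (Nat.choose k k : Int)] := by
    simp [pvPas, List.range_succ]
  rw [h, List.getLast?_concat]
  simp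

theorem pvPas_succ (k : Nat) : pvNextCoeffs (pvPas k) = pvPas (k + 1) := by
  unfold pvNextCoeffs
  rw [PySem.List.slice_from_one, PySem.List.pyGet?_neg_one, pvPas_getLast?]
  have hmid : List.zipWith (fun a b => b - a) (pvPas k) (pvPas k).tail
      = (List.range k).map (fun j => (-1 : Int) ^ (j + 1) * (Nat.choose (k + 1) (j + 1) : Int)) := by
    apply List.ext_getElem
    · simp [pvPas]
    · intro i h1 h2
      simp only [List.length_zipWith, List.length_tail, List.length_map, List.length_range,
        pvPas] at h1 h2
      rw [List.getElem_zipWith, List.getElem_tail]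
      simp only [pvPas, List.getElem_map, List.getElem_range]
      rw [Nat.choose_succ_succ]
      simp only [Nat.succ_eq_add_one]
      push_cast
      ring
  rw [hmid]
  have hrhs : pvPas (k + 1)
      = [1] ++ (List.range k).map (fun j => (-1 : Int) ^ (j + 1) * (Nat.choose (k + 1) (j + 1) : Int))
        ++ [(-1 : Int) ^ (k + 1) * (Nat.choose (k + 1) (k + 1) : Int)] := by
    unfold pvPas
    rw [List.range_succ_eq_map, List.range_succ]
    simp [Function.comp_def]
  rw [hrhs]
  simp [Nat.choose_self, pow_succ]

theorem pv_zip_sum (cs xs : List Int) (h : cs.length ≤ xs.length) :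
    (List.zipWith (fun c v => c * v) cs xs).sum
      = ∑ j ∈ Finset.range cs.length, cs.getD j 0 * xs.getD j 0 := by
  induction cs generalizing xs with
  | nil => simp
  | cons c cs ih =>
    cases xs with
    | nil => simp at h
    | cons x xs =>
      simp only [List.zipWith_cons_cons, List.sum_cons, List.length_cons]
      rw [Finset.sum_range_succ']
      simp only [List.getD_cons_succ, List.getD_cons_zero]
      rw [ih xs (by simpa using h)]
      ring

theorem pvG_peel (xs : List Int) (k m : Nat) :
    pvG xs k m
      = (∑ j ∈ Finset.range k, (-1 : Int) ^ (j + 1) * (Nat.choose k (j + 1) : Int) * xs.getD (m + 1 + j) 0)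
        + xs.getD m 0 := by
  unfold pvG
  rw [Finset.sum_range_succ']
  congr 1
  · apply Finset.sum_congr rfl
    intro j _
    congr 2
    omega
  · simp

theorem pvG_step (xs : List Int) (k m : Nat) :
    pvG xs (k + 1) m = pvG xs k m - pvG xs k (m + 1) := by
  unfold pvG
  rw [Finset.sum_range_succ']
  have hsplit : ∀ j ∈ Finset.range (k + 1),
      (-1 : Int) ^ (j + 1) * (Nat.choose (k + 1) (j + 1) : Int) * xs.getD (m + (j + 1)) 0
        = -((-1 : Int) ^ j * (Nat.choose k j : Int) * xs.getD (m + 1 + j) 0)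
          + (-1 : Int) ^ (j + 1) * (Nat.choose k (j + 1) : Int) * xs.getD (m + 1 + j) 0 := by
    intro j _
    rw [Nat.choose_succ_succ, show m + (j + 1) = m + 1 + j from by omega]
    simp only [Nat.succ_eq_add_one]
    push_cast
    ring
  have hG1 : ∑ j ∈ Finset.range (k + 1), -((-1 : Int) ^ j * (Nat.choose k j : Int) * xs.getD (m + 1 + j) 0)
      = -pvG xs k (m + 1) := by
    rw [Finset.sum_neg_distrib]
    unfold pvG
    rfl
  rw [Finset.sum_congr rfl hsplit, Finset.sum_add_distrib, hG1, Finset.sum_range_succ,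
    Nat.choose_succ_self]
  have hpeel : ∑ j ∈ Finset.range (k + 1), (-1 : Int) ^ j * (Nat.choose k j : Int) * xs.getD (m + j) 0
      = (∑ j ∈ Finset.range k, (-1 : Int) ^ (j + 1) * (Nat.choose k (j + 1) : Int) * xs.getD (m + 1 + j) 0)
        + xs.getD m 0 := by
    have h := pvG_peel xs k m
    unfold pvG at h
    exact h
  have hRG : ∑ j ∈ Finset.range (k + 1), (-1 : Int) ^ j * (Nat.choose k j : Int) * xs.getD (m + 1 + j) 0
      = pvG xs k (m + 1) := by
    unfold pvG
    rfl
  rw [hpeel, hRG]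
  simp only [Nat.add_zero, pow_zero, Nat.choose_zero_right, Nat.cast_one, Nat.cast_zero]
  ring

theorem pvRow_eq (xs : List Int) (k : Nat) :
    pvDiffA^[k] xs = (List.range (xs.length - k)).map (fun m => pvG xs k m) := by
  induction k with
  | zero =>
    have hg : ∀ m, pvG xs 0 m = xs.getD m 0 := by
      intro m
      unfold pvG
      simp
    simp only [Function.iterate_zero, id_eq, Nat.sub_zero, hg]
    apply List.ext_getElem
    · simp
    · intro i h1 h2
      rw [List.getElem_map, List.getElem_range]
      exact (List.getD_eq_getElem xs 0 h1).symm
  | succ k ih =>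
    rw [Function.iterate_succ_apply', ih]
    unfold pvDiffA
    apply List.ext_getElem
    · simp; omega
    · intro i h1 h2
      simp only [List.length_map, List.length_range] at h1 h2 ⊢
      rw [List.getElem_map, List.getElem_map, List.getElem_range, List.getElem_range]
      have hb1 : i < xs.length - k := by omega
      have hb2 : i + 1 < xs.length - k := by omega
      rw [List.getD_eq_getElem _ 0 (by simpa using hb1), List.getD_eq_getElem _ 0 (by simpa using hb2)]
      rw [List.getElem_map, List.getElem_map, List.getElem_range, List.getElem_range]
      exact (pvG_step xs k i).symm

theorem pvSet_singleton (x : Int) : (PySem.Set.ofList [x]).length = 1 := by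
  simp [PySem.Set.ofList, PySem.Set.add]

theorem pvBsum (xs : List Int) (K : Nat) :
    ∑ j ∈ Finset.range (K + 1), (-1 : Int) ^ j * (Nat.choose (K + 1) (j + 1) : Int) * xs.getD j 0
      = ∑ k ∈ Finset.range (K + 1), pvG xs k 0 := by
  induction K with
  | zero => simp [pvG]
  | succ K ih =>
    have hsplit : ∀ j ∈ Finset.range (K + 1 + 1),
        (-1 : Int) ^ j * (Nat.choose (K + 1 + 1) (j + 1) : Int) * xs.getD j 0
          = (-1 : Int) ^ j * (Nat.choose (K + 1) j : Int) * xs.getD j 0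
            + (-1 : Int) ^ j * (Nat.choose (K + 1) (j + 1) : Int) * xs.getD j 0 := by
      intro j _
      rw [Nat.choose_succ_succ]
      push_cast
      ring
    have hL : (∑ j ∈ Finset.range (K + 1 + 1),
          (-1 : Int) ^ j * (Nat.choose (K + 1 + 1) (j + 1) : Int) * xs.getD j 0)
        = pvG xs (K + 1) 0
          + ∑ j ∈ Finset.range (K + 1), (-1 : Int) ^ j * (Nat.choose (K + 1) (j + 1) : Int) * xs.getD j 0 := by
      rw [Finset.sum_congr rfl hsplit, Finset.sum_add_distrib]
      congr 1
      · unfold pvG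
        apply Finset.sum_congr rfl
        intro j _
        congr 2
        omega
      · rw [Finset.sum_range_succ, Nat.choose_succ_self]
        simp
    rw [hL, ih, Finset.sum_range_succ (fun k => pvG xs k 0) (K + 1)]
    ring_nf

theorem pvPas_len (k : Nat) : (pvPas k).length = k + 1 := by
  simp [pvPas]

theorem pvMapRange_headD (f : Nat → Int) (t : Nat) (ht : 0 < t) :
    (((List.range t).map f).headD 0) = f 0 := by
  cases t with
  | zero => omega
  | succ t =>
    rw [List.range_succ_eq_map]
    simp

-- B's convolution row equals the k-th difference row entries
theorem pvRowConv (xs : List Int) (k : Nat) (hk : k + 2 ≤ xs.length) :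
    (List.range (xs.length - (k + 1))).map
      (fun (m : Nat) => (List.zipWith (fun c v => c * v) (pvPas (k + 1)) (PySem.List.slice xs (some (m : Int)) none)).sum)
      = (List.range (xs.length - (k + 1))).map (fun m => pvG xs (k + 1) m) := by
  apply List.map_congr_left
  intro m hm
  rw [List.mem_range] at hm
  rw [PySem.List.slice_from_natCast, pv_zip_sum _ _ (by simp [pvPas_len]; omega), pvPas_len]
  unfold pvG
  apply Finset.sum_congr rfl
  intro j hj
  rw [Finset.mem_range] at hj
  have hc : (pvPas (k + 1)).getD j 0 = (-1 : Int) ^ j * (Nat.choose (k + 1) j : Int) := by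
    rw [List.getD_eq_getElem _ 0 (by simp [pvPas_len]; omega)]
    simp [pvPas]
  have hx : (xs.drop m).getD j 0 = xs.getD (m + j) 0 := by
    simp [List.getD, List.getElem?_drop]
  rw [hc, hx]

theorem pv_parallel (xs : List Int) : ∀ (f k : Nat) (acc : List Int),
    2 ≤ xs.length → k + f = xs.length → k ≤ xs.length - 2 →
    acc.sum = ∑ j ∈ Finset.range (k + 1), pvG xs j 0 →
    pvLoopA f (pvDiffA^[k] xs) acc = pvLoopB f xs (pvPas k) k := by
  intro f
  induction f with
  | zero =>
    intro k acc h2 hkf hk hacc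
    omega
  | succ f ih =>
    intro k acc h2 hkf hk hacc
    have hdiff : pvDiffA (pvDiffA^[k] xs) = pvDiffA^[k + 1] xs :=
      (Function.iterate_succ_apply' _ _ _).symm
    have hrowA : pvDiffA^[k + 1] xs
        = (List.range (xs.length - (k + 1))).map (fun m => pvG xs (k + 1) m) := pvRow_eq xs (k + 1)
    have hrowB := pvRowConv xs k (by omega)
    have hhead : (pvDiffA^[k + 1] xs).headD 0 = pvG xs (k + 1) 0 := by
      rw [hrowA]
      exact pvMapRange_headD _ _ (by omega)
    simp only [pvLoopA, pvLoopB, pvPas_succ k, hdiff, hrowB, hrowA]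
    by_cases hcond : (PySem.Set.ofList ((List.range (xs.length - (k + 1))).map (fun m => pvG xs (k + 1) m))).length = 1
    · rw [if_pos hcond, if_pos hcond]
      rw [List.sum_append, List.sum_cons, List.sum_nil]
      rw [← hrowA, hhead, hacc]
      -- B's returned value
      rw [pvPas_succ (k + 1), PySem.List.slice_from_one, pvPas_tail (k + 1)]
      rw [pv_zip_sum _ _ (by simp; omega)]
      simp only [List.length_map, List.length_range]
      have hterm : ∀ j ∈ Finset.range (k + 2),
          ((List.range (k + 2)).map (fun j => (-1 : Int) ^ (j + 1) * (Nat.choose (k + 2) (j + 1) : Int))).getD j 0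
            * xs.getD j 0
          = -((-1 : Int) ^ j * (Nat.choose (k + 2) (j + 1) : Int) * xs.getD j 0) := by
        intro j hj
        rw [Finset.mem_range] at hj
        rw [List.getD_eq_getElem _ 0 (by simpa using hj)]
        simp only [List.getElem_map, List.getElem_range]
        ring
      rw [Finset.sum_congr rfl hterm, Finset.sum_neg_distrib, neg_neg]
      have hB : ∑ j ∈ Finset.range (k + 2), (-1 : Int) ^ j * (Nat.choose (k + 2) (j + 1) : Int) * xs.getD j 0
          = ∑ j ∈ Finset.range (k + 2), pvG xs j 0 := pvBsum xs (k + 1)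
      have hs : ∑ j ∈ Finset.range (k + 2), pvG xs j 0
          = ∑ j ∈ Finset.range (k + 1), pvG xs j 0 + pvG xs (k + 1) 0 :=
        Finset.sum_range_succ _ (k + 1)
      rw [hB, hs]
      ring
    · rw [if_neg hcond, if_neg hcond]
      have hk2 : k + 1 ≤ xs.length - 2 := by
        rcases Nat.lt_or_ge (k + 1) (xs.length - 1) with h | h
        · omega
        · exfalso
          have hone : xs.length - (k + 1) = 1 := by omega
          apply hcond
          rw [hone, List.range_one, List.map_cons, List.map_nil]
          exact pvSet_singleton _
      have hacc' : (acc ++ [(pvDiffA^[k + 1] xs).headD 0]).sum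
          = ∑ j ∈ Finset.range (k + 1 + 1), pvG xs j 0 := by
        rw [List.sum_append, List.sum_cons, List.sum_nil, hhead, hacc,
          Finset.sum_range_succ (fun j => pvG xs j 0) (k + 1)]
        ring
      have hih := ih (k + 1) (acc ++ [(pvDiffA^[k + 1] xs).headD 0]) h2 (by omega) hk2 hacc'
      rw [hrowA] at hih
      exact hih

-- ===== VERDICT (by name: the statement is the Claim_ definition above) =====
theorem calc_val_spec : Claim_equal_calc_val := by
  intro xs _ hpre
  unfold Spec_calc_val calc_val calc_val_alt
  have hpas0 : pvPas 0 = [1] := by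
    simp [pvPas]
  have hsum : ([xs.headD 0] : List Int).sum = ∑ j ∈ Finset.range 1, pvG xs j 0 := by
    cases xs with
    | nil => simp [Pre_calc_val] at hpre
    | cons a l => simp [pvG]
  have h := pv_parallel xs xs.length 0 [xs.headD 0] hpre (by omega) (by
    unfold Pre_calc_val at hpre
    omega) hsum
  rw [← hpas0]
  simpa using h
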